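-- pv_equiv track=rewrite | github.com/NateCarp3/CompSci | GameOfLife.py | innerCells
-- ===== SOURCE A (Python) =====
-- def createOneRow(width):
--     """Returns one row of zeros of width "width"
--        This function should be used in
--        createBoard(width, height) function."""
--     row = []
--     for col in range(width):
--         row += [0]
--     return row
--
-- def createBoard(width, height):
--     """ returns a 2d array with "height" rows and "width" cols """
--     A = []
--     for row in range(height):
--         A += [createOneRow(width)]   # What do you need to add a whole row here?
--     return A
--
-- def innerCells(width,height):
--     """ returns an array of all live cells with a value of 1 except for
--     the 1 cell wide border of 0 around the array
--     """
--     A = createBoard( width, height )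
--
--     for row in range(height):
--         for col in range(width):
--             if row == 0 or col == 0:
--                 A[row][col] = 0
--             elif row == (height -1) or col == (width - 1):
--                 A[row][col] = 0
--             else:
--                 A[row][col] = 1
--
--     return A
-- ===== SOURCE B (Python) =====
-- def innerCells(width, height):
--     """ returns an array of all live cells with a value of 1 except for
--     the 1 cell wide border of 0 around the array
--     """
--     if height <= 0:
--         return []
--     border_row = [0] * width
--     if width >= 2:
--         inner_row = [0] + [1] * (width - 2) + [0]
--     else:
--         inner_row = border_row[:]          # width 0 or 1: every cell is border
--     if height == 1:
--         return [border_row]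
--     return [border_row] + [inner_row[:] for _ in range(height - 2)] + [border_row[:]]
-- ===== Notes on version B (the rewrite author's own statement) =====
-- stated objective: alternative
-- what changed: B never visits a cell: it builds the whole grid by list replication and concatenation ([border_row] + (height-2) copies of a precomputed inner row [0]+[1]*(width-2)+[0] + [border_row]), with explicit dispatch on degenerate heights/widths, instead of A's allocate-a-zero-board-then-overwrite-every-cell-with-four-edge-tests double loop.
import Mathlib
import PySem

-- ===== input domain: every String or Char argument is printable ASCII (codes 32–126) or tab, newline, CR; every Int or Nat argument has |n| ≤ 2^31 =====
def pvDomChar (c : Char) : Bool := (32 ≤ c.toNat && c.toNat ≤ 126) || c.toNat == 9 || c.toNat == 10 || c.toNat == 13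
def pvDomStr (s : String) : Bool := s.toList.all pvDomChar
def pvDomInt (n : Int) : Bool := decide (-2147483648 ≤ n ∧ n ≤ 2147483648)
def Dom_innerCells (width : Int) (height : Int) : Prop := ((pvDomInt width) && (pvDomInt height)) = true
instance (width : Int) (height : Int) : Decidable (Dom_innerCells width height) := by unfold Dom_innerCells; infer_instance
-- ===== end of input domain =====

-- B builds the grid by list replication and concatenation (top border row, (height-2) copies of one
-- precomputed inner row, bottom border row) instead of A's allocate-then-overwrite-every-cell double
-- loop; objective: alternative construction, no per-cell work.

-- ===== PORT A =====
def createOneRow (width : Int) : List Int :=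
  (PySem.List.pyRange 0 width 1).foldl (fun row _ => row ++ [0]) []

def createBoard (width : Int) (height : Int) : List (List Int) :=
  (PySem.List.pyRange 0 height 1).foldl (fun A _ => A ++ [createOneRow width]) []

def innerCells (width : Int) (height : Int) : List (List Int) :=
  let A := createBoard width height
  (PySem.List.pyRange 0 height 1).foldl (fun A row =>
    (PySem.List.pyRange 0 width 1).foldl (fun A col =>
      if row = 0 ∨ col = 0 then
        PySem.List.pySetD A row (PySem.List.pySetD (PySem.List.pyGetD A row []) col 0)
      else if row = height - 1 ∨ col = width - 1 then
        PySem.List.pySetD A row (PySem.List.pySetD (PySem.List.pyGetD A row []) col 0)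
      else
        PySem.List.pySetD A row (PySem.List.pySetD (PySem.List.pyGetD A row []) col 1)) A) A

-- ===== PORT B =====
def innerCells_alt (width : Int) (height : Int) : List (List Int) :=
  if height ≤ 0 then []
  else
    let border_row := PySem.List.pyRepeat [(0 : Int)] width
    let inner_row :=
      if 2 ≤ width then [(0 : Int)] ++ PySem.List.pyRepeat [(1 : Int)] (width - 2) ++ [0]
      else border_row
    if height = 1 then [border_row]
    else [border_row] ++ PySem.List.pyRepeat [inner_row] (height - 2) ++ [border_row]

-- ===== PRECONDITION & SPEC =====
def Spec_innerCells (width : Int) (height : Int) (out : List (List Int)) : Prop := out = innerCells_alt width height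
instance (width : Int) (height : Int) (out : List (List Int)) : Decidable (Spec_innerCells width height out) := by unfold Spec_innerCells; infer_instance

-- ===== CLAIM (what is proved, stated in full; the proofs are below) =====
def Claim_equal_innerCells : Prop := ∀ (width : Int) (height : Int), Dom_innerCells width height → Spec_innerCells width height (innerCells width height)

-- ===== LEMMAS AND PROOFS =====

-- cell value A writes at (row r, col c)
def pvCell (width height : Int) (r c : Nat) : Int :=
  if (r : Int) = 0 ∨ (c : Int) = 0 then 0
  else if (r : Int) = height - 1 ∨ (c : Int) = width - 1 then 0 else 1

-- a fold over range m whose step sets position i (as a function of i and the old value)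
-- rewrites the first m entries in place
theorem pv_foldl_set {α : Type} (b : List α → Nat → List α) (u : Nat → α → α) (d : α)
    (hb : ∀ (ys : List α) (i : Nat), i < ys.length → b ys i = ys.set i (u i (ys.getD i d))) :
    ∀ (m : Nat) (xs : List α), m ≤ xs.length →
      (List.range m).foldl b xs
        = (List.range m).map (fun i => u i (xs.getD i d)) ++ xs.drop m := by
  intro m
  induction m with
  | zero => intro xs _; simp
  | succ m ih =>
      intro xs hm
      have hmlt : m < xs.length := Nat.lt_of_succ_le hm
      rw [List.range_succ, List.foldl_append, ih xs (Nat.le_of_lt hmlt)]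
      set P := (List.range m).map (fun i => u i (xs.getD i d)) with hP
      have hPlen : P.length = m := by simp [hP]
      have hdrop : xs.drop m = xs[m] :: xs.drop (m + 1) := List.drop_eq_getElem_cons hmlt
      have hgd : (P ++ xs.drop m).getD m d = xs[m] := by
        rw [List.getD_eq_getElem?_getD, List.getElem?_append_right (by omega)]
        simp [hPlen, List.getElem?_eq_getElem hmlt]
      have hlen2 : m < (P ++ xs.drop m).length := by
        simp [hPlen]; omega
      rw [List.foldl_cons, List.foldl_nil, hb _ m hlen2, hgd]
      rw [List.set_append_right _ _ (by omega)]
      rw [hdrop, hPlen, Nat.sub_self, List.map_append]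
      simp only [List.set_cons_zero, List.map_cons, List.map_nil,
        List.getD_eq_getElem?_getD, List.getElem?_eq_getElem hmlt, Option.getD_some,
        List.append_assoc, List.singleton_append]
      simp only [hP, List.getD_eq_getElem?_getD]

-- the inner column loop only rewrites row r of the board
theorem pv_inner_comm (v : Nat → Int) :
    ∀ (cs : List Nat) (A : List (List Int)) (r : Nat), r < A.length →
      cs.foldl (fun A c => A.set r ((A.getD r []).set c (v c))) A
        = A.set r (cs.foldl (fun ys c => ys.set c (v c)) (A.getD r [])) := by
  intro cs
  induction cs with
  | nil =>
      intro A r hr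
      simp [List.getD_eq_getElem?_getD, List.getElem?_eq_getElem hr, List.set_getElem_self]
  | cons c cs ih =>
      intro A r hr
      have hr' : r < (A.set r ((A.getD r []).set c (v c))).length := by simpa using hr
      rw [List.foldl_cons, ih _ r hr', List.set_set]
      congr 1
      rw [List.getD_eq_getElem?_getD, List.getElem?_set_self (by simpa using hr)]
      simp [List.getD_eq_getElem?_getD]

-- A's result as a map over row/column indices
theorem innerCells_eq_map (width height : Int) :
    innerCells width height
      = (List.range height.toNat).map
          (fun r => (List.range width.toNat).map (fun c => pvCell width height r c)) := by
  have hrow : createOneRow width = List.replicate width.toNat (0 : Int) := by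
    unfold createOneRow
    rw [show (fun (row : List Int) (_ : Int) => row ++ [(0:Int)]) = (fun acc x => acc ++ [(fun (_ : Int) => (0:Int)) x]) from rfl,
        PySem.List.foldl_append_singleton_eq_map]
    simp [PySem.List.pyRange_one, Function.comp_def, List.map_const']
  have hboard : createBoard width height
      = List.replicate height.toNat (List.replicate width.toNat (0 : Int)) := by
    unfold createBoard
    rw [show (fun (A : List (List Int)) (_ : Int) => A ++ [createOneRow width]) = (fun acc x => acc ++ [(fun (_ : Int) => createOneRow width) x]) from rfl,
        PySem.List.foldl_append_singleton_eq_map, hrow]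
    simp [PySem.List.pyRange_one, Function.comp_def, List.map_const']
  have hbody : ∀ (A : List (List Int)) (r : Nat),
      (PySem.List.pyRange 0 width 1).foldl (fun A col =>
        if ((r : Int)) = 0 ∨ col = 0 then
          PySem.List.pySetD A ((r : Int)) (PySem.List.pySetD (PySem.List.pyGetD A ((r : Int)) []) col 0)
        else if ((r : Int)) = height - 1 ∨ col = width - 1 then
          PySem.List.pySetD A ((r : Int)) (PySem.List.pySetD (PySem.List.pyGetD A ((r : Int)) []) col 0)
        else
          PySem.List.pySetD A ((r : Int)) (PySem.List.pySetD (PySem.List.pyGetD A ((r : Int)) []) col 1)) A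
      = (List.range width.toNat).foldl
          (fun A c => A.set r ((A.getD r []).set c (pvCell width height r c))) A := by
    intro A r
    rw [PySem.List.pyRange_one 0 width, List.foldl_map]
    simp only [zero_add, sub_zero]
    apply PySem.List.foldl_congr_mem
    intro acc c _hc
    simp only [PySem.List.pySetD_natCast, PySem.List.pyGetD_natCast, pvCell]
    split_ifs <;> rfl
  have hset : ∀ (A : List (List Int)) (r : Nat), r < A.length →
      (List.range width.toNat).foldl
          (fun A c => A.set r ((A.getD r []).set c (pvCell width height r c))) A
        = A.set r ((List.range width.toNat).foldl
            (fun ys c => ys.set c (pvCell width height r c)) (A.getD r [])) :=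
    fun A r hr => pv_inner_comm (pvCell width height r) _ A r hr
  have h1 : innerCells width height
      = (List.range height.toNat).foldl
          (fun A r => (List.range width.toNat).foldl
            (fun A c => A.set r ((A.getD r []).set c (pvCell width height r c))) A)
          (List.replicate height.toNat (List.replicate width.toNat (0 : Int))) := by
    unfold innerCells
    rw [hboard, PySem.List.pyRange_one 0 height, List.foldl_map]
    simp only [zero_add, sub_zero]
    exact PySem.List.foldl_congr_mem _ _ _ _ (fun A r _ => hbody A r)
  rw [h1]
  rw [pv_foldl_set _
      (fun r old => (List.range width.toNat).foldl
        (fun ys c => ys.set c (pvCell width height r c)) old)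
      ([] : List Int) (fun ys i hi => hset ys i hi)
      height.toNat _ (by simp)]
  simp only [List.drop_replicate, Nat.sub_self, List.replicate_zero, List.append_nil]
  apply List.map_congr_left
  intro r hr
  rw [List.mem_range] at hr
  have hgd : (List.replicate height.toNat (List.replicate width.toNat (0 : Int))).getD r []
      = List.replicate width.toNat (0 : Int) := by
    rw [List.getD_eq_getElem?_getD, List.getElem?_replicate]
    simp [hr]
  rw [hgd]
  have := pv_foldl_set (fun ys c => ys.set c (pvCell width height r c))
      (fun c _ => pvCell width height r c) (0 : Int)
      (fun ys i hi => by
        rw [List.getD_eq_getElem?_getD, List.getElem?_eq_getElem hi])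
      width.toNat (List.replicate width.toNat (0 : Int)) (by simp)
  rw [this]
  simp

-- a map over range (m+2) whose value is z at both ends and i strictly inside is a framed replicate
theorem pv_map_range_frame {α : Type} (f : Nat → α) (m : Nat) (z i : α)
    (h0 : f 0 = z) (hl : f (m + 1) = z)
    (hm : ∀ k, 1 ≤ k → k ≤ m → f k = i) :
    (List.range (m + 2)).map f = [z] ++ List.replicate m i ++ [z] := by
  rw [List.range_succ, List.map_append, List.range_succ_eq_map, List.map_cons, List.map_map]
  have hmid : (List.range m).map (f ∘ Nat.succ) = List.replicate m i := by
    rw [List.eq_replicate_iff]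
    refine ⟨by simp, ?_⟩
    intro x hx
    rw [List.mem_map] at hx
    obtain ⟨k, hk, hkx⟩ := hx
    rw [List.mem_range] at hk
    rw [← hkx]
    exact hm (k + 1) (by omega) (by omega)
  simp [h0, hl, hmid]

-- ===== VERDICT (by name: the statement is the Claim_ definition above) =====
theorem innerCells_spec : Claim_equal_innerCells := by
  intro width height _
  unfold Spec_innerCells innerCells_alt
  rw [innerCells_eq_map]
  -- the inner row of A's map form, as B builds it
  have hinner : ∀ r : Nat, (1 : Int) ≤ (r : Int) → (r : Int) ≠ height - 1 →
      (List.range width.toNat).map (fun c => pvCell width height r c)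
        = (if 2 ≤ width then [(0 : Int)] ++ PySem.List.pyRepeat [(1 : Int)] (width - 2) ++ [0]
           else PySem.List.pyRepeat [(0 : Int)] width) := by
    intro r hr1 hrl
    by_cases hw : 2 ≤ width
    · rw [if_pos hw, PySem.List.pyRepeat_singleton]
      have hwn : width.toNat = (width - 2).toNat + 2 := by omega
      rw [hwn]
      apply pv_map_range_frame
      · simp [pvCell]
      · have : (((width - 2).toNat + 1 : Nat) : Int) = width - 1 := by push_cast; omega
        simp [pvCell, this]
      · intro k hk1 hkm
        have hkl : (k : Int) ≠ width - 1 := by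
          have : (k : Int) ≤ width - 2 := by omega
          omega
        unfold pvCell
        rw [if_neg (by omega), if_neg (by simp only [not_or]; exact ⟨hrl, hkl⟩)]
    · rw [if_neg hw, PySem.List.pyRepeat_singleton]
      have hcase : width.toNat = 0 ∨ width.toNat = 1 := by omega
      rcases hcase with h | h <;> rw [h]
      · simp
      · simp [pvCell]
  -- the border row of A's map form
  have hborder : ∀ r : Nat, (r : Int) = 0 ∨ (r : Int) = height - 1 →
      (List.range width.toNat).map (fun c => pvCell width height r c)
        = PySem.List.pyRepeat [(0 : Int)] width := by
    intro r hr
    rw [PySem.List.pyRepeat_singleton, List.eq_replicate_iff]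
    refine ⟨by simp, ?_⟩
    intro x hx
    rw [List.mem_map] at hx
    obtain ⟨c, _, hc⟩ := hx
    rcases hr with h0 | h0 <;> rw [← hc] <;> simp [pvCell, h0]
  by_cases hh0 : height ≤ 0
  · rw [if_pos hh0]
    have : height.toNat = 0 := by omega
    simp [this]
  · rw [if_neg hh0]
    by_cases hh1 : height = 1
    · rw [if_pos hh1]
      subst hh1
      simp only [show (1 : Int).toNat = 1 from rfl, List.range_one, List.map_cons, List.map_nil]
      rw [hborder 0 (Or.inl rfl)]
    · rw [if_neg hh1]
      have hh2 : 2 ≤ height := by omega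
      have hhn : height.toNat = (height - 2).toNat + 2 := by omega
      simp only [PySem.List.pyRepeat_singleton] at hinner hborder ⊢
      rw [hhn]
      apply pv_map_range_frame
      · exact hborder 0 (Or.inl rfl)
      · apply hborder
        right
        push_cast; omega
      · intro k hk1 hkm
        apply hinner
        · omega
        · have : (k : Int) ≤ height - 2 := by omega
          omega
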